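-- pv_equiv track=rewrite | github.com/Shuai99999/RDP-CPRO-1201-Python-Programming-I | test4.py | nearest_perfect_squares
-- ===== SOURCE A (Python) =====
-- def nearest_perfect_squares(n):
--     # Find the largest perfect square smaller than n
--     smaller = n - 1
--     while True:
--         root = 1
--         while root * root <= smaller:
--             if root * root == smaller:
--                 break
--             root += 1
--         if root * root == smaller:
--             break
--         smaller -= 1
--
--     # Find the smallest perfect square larger than n
--     larger = n + 1
--     while True:
--         root = 1
--         while root * root <= larger:
--             if root * root == larger:
--                 break
--             root += 1
--         if root * root == larger:
--             break
--         larger += 1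
--
--     return smaller, larger
-- ===== SOURCE B (Python) =====
-- def nearest_perfect_squares(n):
--     # One O(sqrt(n)) scan computes r = floor(sqrt(n-1)); both bounding
--     # squares then follow arithmetically.
--     r = 0
--     while (r + 1) * (r + 1) <= n - 1:
--         r += 1
--     smaller = r * r
--     if (r + 1) * (r + 1) == n:
--         larger = (r + 2) * (r + 2)
--     else:
--         larger = (r + 1) * (r + 1)
--     return smaller, larger
-- ===== Notes on version B (the rewrite author's own statement) =====
-- stated objective: faster
-- what changed: Replaces the brute-force scans (decrement/increment a candidate and re-test squareness each time by incrementing a root from 1) with a single O(sqrt(n)) loop computing floor(sqrt(n-1)), from which both bounding perfect squares follow arithmetically.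
-- outside the precondition, e.g. on nearest_perfect_squares(1): A does not finish within the time limit, B returns (0, 4)
import Mathlib
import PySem

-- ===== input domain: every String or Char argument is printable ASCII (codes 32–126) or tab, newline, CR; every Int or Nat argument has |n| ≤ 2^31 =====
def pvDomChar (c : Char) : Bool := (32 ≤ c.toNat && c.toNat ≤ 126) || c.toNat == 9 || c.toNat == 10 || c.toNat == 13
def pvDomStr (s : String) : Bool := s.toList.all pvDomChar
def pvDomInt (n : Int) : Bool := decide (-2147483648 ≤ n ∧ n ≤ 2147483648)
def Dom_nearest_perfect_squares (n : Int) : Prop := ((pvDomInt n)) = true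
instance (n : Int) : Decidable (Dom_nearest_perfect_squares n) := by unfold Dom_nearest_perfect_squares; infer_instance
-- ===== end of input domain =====

-- B replaces A's brute-force scans by one loop computing ⌊√(n-1)⌋,
-- from which both bounding squares follow arithmetically (objective: faster).

-- ===== PORT A =====
-- inner 'while root*root <= smaller: if root*root == smaller: break; root += 1'
def npsInner (m root : Int) : Int :=
  if h1 : root * root ≤ m then
    if h2 : root * root = m then root
    else npsInner m (root + 1)
  else root
termination_by (m - root).toNat
decreasing_by
  have hlt : root * root < m := lt_of_le_of_ne h1 h2
  have h0 : (0:Int) ≤ root * root := mul_self_nonneg root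
  by_cases h : 1 ≤ root
  · have hle : root ≤ root * root := le_mul_of_one_le_left (by omega) h
    omega
  · omega

-- the 'if root * root == smaller' check after the inner loop
def npsIsSq (m : Int) : Bool :=
  let root := npsInner m 1
  root * root == m

-- outer 'smaller' loop; the 'm < 1' guard only makes the recursion total:
-- Python loops forever there (excluded by Pre_), so the branch is never reached.
def npsDown (m : Int) : Int :=
  if h : m < 1 then m
  else if npsIsSq m then m else npsDown (m - 1)
termination_by m.toNat
decreasing_by omega

-- outer 'larger' loop; 'bound' (a perfect square ≥ the start) only makes the
-- recursion total; its guard is never reached under Pre_.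
def npsUp (bound m : Int) : Int :=
  if h : bound < m then m
  else if npsIsSq m then m else npsUp bound (m + 1)
termination_by (bound + 1 - m).toNat
decreasing_by omega

def nearest_perfect_squares (n : Int) : List Int :=
  let smaller := npsDown (n - 1)
  let larger := npsUp (((n.toNat + 1) * (n.toNat + 1) : Nat) : Int) (n + 1)
  [smaller, larger]

-- ===== PORT B =====
-- 'while (r+1)*(r+1) <= n-1: r += 1'
def altFindR (n r : Int) : Int :=
  if h : (r + 1) * (r + 1) ≤ n - 1 then altFindR n (r + 1) else r
termination_by (n - 1 - r).toNat
decreasing_by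
  have h0 : (0:Int) ≤ (r + 1) * (r + 1) := mul_self_nonneg (r + 1)
  by_cases hr : 1 ≤ r + 1
  · have hle : r + 1 ≤ (r + 1) * (r + 1) := le_mul_of_one_le_left (by omega) hr
    omega
  · omega

def nearest_perfect_squares_alt (n : Int) : List Int :=
  let r := altFindR n 0
  let smaller := r * r
  let larger := if (r + 1) * (r + 1) = n then (r + 2) * (r + 2) else (r + 1) * (r + 1)
  [smaller, larger]

-- ===== PRECONDITION & SPEC =====
-- Pre_ excludes n ≤ 1, where Python A never returns (its 'smaller' loop
-- decrements below every perfect square and runs forever).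
def Pre_nearest_perfect_squares (n : Int) : Prop := 2 ≤ n
instance (n : Int) : Decidable (Pre_nearest_perfect_squares n) := by
  unfold Pre_nearest_perfect_squares; infer_instance

def pvWitness_nearest_perfect_squares : Int := 10

def Spec_nearest_perfect_squares (n : Int) (out : List Int) : Prop := out = nearest_perfect_squares_alt n
instance (n : Int) (out : List Int) : Decidable (Spec_nearest_perfect_squares n out) := by unfold Spec_nearest_perfect_squares; infer_instance

-- ===== CLAIM (what is proved, stated in full; the proofs are below) =====
def Claim_equal_nearest_perfect_squares : Prop := ∀ (n : Int), Dom_nearest_perfect_squares n → Pre_nearest_perfect_squares n → Spec_nearest_perfect_squares n (nearest_perfect_squares n)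

-- ===== LEMMAS AND PROOFS =====

-- the inner loop never returns a root below its start
theorem npsInner_ge (m root : Int) : root ≤ npsInner m root := by
  induction hn : (m - root).toNat using Nat.strong_induction_on generalizing root with
  | _ t ih =>
    rw [npsInner.eq_def]
    split_ifs with h1 h2
    · omega
    · have hlt : root * root < m := lt_of_le_of_ne h1 h2
      have h0 : (0:Int) ≤ root * root := mul_self_nonneg root
      have hm : root < m := by
        by_cases h : 1 ≤ root
        · have hle : root ≤ root * root := le_mul_of_one_le_left (by omega) h
          omega
        · omega
      have := ih (m - (root + 1)).toNat (by omega) (root + 1) rfl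
      omega
    · omega

-- if m is a perfect square with witness k ≥ root ≥ 1, the inner scan finds it
theorem npsInner_finds (m k root : Int) (h1 : 1 ≤ root) (hk : root ≤ k)
    (hm : k * k = m) : (npsInner m root) * (npsInner m root) = m := by
  induction hr : (k - root).toNat generalizing root with
  | zero =>
      have : root = k := by omega
      subst this
      rw [npsInner.eq_def]
      simp [hm]
  | succ t ih =>
      have hlt : root < k := by omega
      rw [npsInner.eq_def]
      have hle : root * root ≤ m := by nlinarith
      split_ifs with h2
      · simp [h2]
      · exact ih (root + 1) (by omega) (by omega) (by omega)

-- soundness + completeness of the squareness test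
theorem npsIsSq_iff (m : Int) :
    npsIsSq m = true ↔ ∃ k, 1 ≤ k ∧ k * k = m := by
  constructor
  · intro h
    refine ⟨npsInner m 1, npsInner_ge m 1, ?_⟩
    unfold npsIsSq at h
    simpa using h
  · rintro ⟨k, hk1, hk⟩
    unfold npsIsSq
    simp only [beq_iff_eq]
    exact npsInner_finds m k 1 le_rfl (by nlinarith) hk

-- no perfect square strictly between r² and (r+1)² (r ≥ 0)
theorem no_square_between (r m : Int) (hr : 0 ≤ r)
    (h1 : r * r < m) (h2 : m < (r + 1) * (r + 1)) :
    ¬ ∃ k, 1 ≤ k ∧ k * k = m := by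
  rintro ⟨k, hk1, hk⟩
  rcases le_or_gt k r with h | h
  · have : k * k ≤ r * r := mul_le_mul h h (by omega) hr
    omega
  · have : (r + 1) * (r + 1) ≤ k * k := mul_le_mul (by omega) (by omega) (by omega) (by omega)
    omega

-- descent from m with r² ≤ m < (r+1)², r ≥ 1, stops exactly at r²
theorem npsDown_eq (r m : Int) (hr : 1 ≤ r) (hlo : r * r ≤ m)
    (hhi : m < (r + 1) * (r + 1)) : npsDown m = r * r := by
  induction hd : (m - r * r).toNat generalizing m with
  | zero =>
      have hm : m = r * r := by
        have : (0:Int) ≤ m - r * r := by omega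
        omega
      subst hm
      have hsq : npsIsSq (r * r) = true := (npsIsSq_iff _).2 ⟨r, hr, rfl⟩
      rw [npsDown.eq_def]
      have : ¬ (r * r < 1) := by nlinarith
      simp [this, hsq]
  | succ t ih =>
      have hlt : r * r < m := by omega
      have hm1 : (1:Int) ≤ m := by nlinarith
      have hns : ¬ npsIsSq m = true := fun h =>
        no_square_between r m (by omega) hlt hhi ((npsIsSq_iff m).1 h)
      rw [npsDown.eq_def]
      rw [dif_neg (by omega : ¬ m < 1)]
      rw [if_neg hns]
      exact ih (m - 1) (by omega) (by omega) (by omega)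

-- ascent from m with r² < m ≤ (r+1)², r ≥ 1, stops exactly at (r+1)²
theorem npsUp_eq (r bound m : Int) (hr : 1 ≤ r) (hlo : r * r < m)
    (hhi : m ≤ (r + 1) * (r + 1)) (hb : (r + 1) * (r + 1) ≤ bound) :
    npsUp bound m = (r + 1) * (r + 1) := by
  induction hd : ((r + 1) * (r + 1) - m).toNat generalizing m with
  | zero =>
      have hm : m = (r + 1) * (r + 1) := by omega
      subst hm
      have hsq : npsIsSq ((r + 1) * (r + 1)) = true :=
        (npsIsSq_iff _).2 ⟨r + 1, by omega, rfl⟩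
      rw [npsUp.eq_def]
      rw [dif_neg (by omega : ¬ bound < (r + 1) * (r + 1))]
      rw [if_pos hsq]
  | succ t ih =>
      have hlt : m < (r + 1) * (r + 1) := by omega
      have hns : ¬ npsIsSq m = true := fun h =>
        no_square_between r m (by omega) hlo hlt ((npsIsSq_iff m).1 h)
      rw [npsUp.eq_def]
      rw [dif_neg (by omega : ¬ bound < m)]
      rw [if_neg hns]
      exact ih (m + 1) (by omega) (by omega) (by omega)

-- B's loop computes ⌊√(n-1)⌋: result r' ≥ 0 with r'² ≤ n-1 < (r'+1)²
theorem altFindR_spec (n r : Int) (hr : 0 ≤ r) (hle : r * r ≤ n - 1) :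
    0 ≤ altFindR n r ∧ (altFindR n r) * (altFindR n r) ≤ n - 1 ∧
      n - 1 < (altFindR n r + 1) * (altFindR n r + 1) := by
  induction hd : (n - 1 - r).toNat generalizing r with
  | zero =>
      have hrn : n - 1 ≤ r := by omega
      have hng : ¬ (r + 1) * (r + 1) ≤ n - 1 := by nlinarith
      rw [altFindR.eq_def]
      rw [dif_neg hng]
      exact ⟨hr, hle, by nlinarith⟩
  | succ t ih =>
      rw [altFindR.eq_def]
      split_ifs with hg
      · have hr1 : r + 1 ≤ (r + 1) * (r + 1) := le_mul_of_one_le_left (by omega) (by omega)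
        exact ih (r + 1) (by omega) hg (by omega)
      · exact ⟨hr, hle, by omega⟩

-- ===== VERDICT (by name: the statement is the Claim_ definition above) =====
theorem nearest_perfect_squares_spec : Claim_equal_nearest_perfect_squares := by
  intro n _hdom hpre
  unfold Pre_nearest_perfect_squares at hpre
  unfold Spec_nearest_perfect_squares nearest_perfect_squares nearest_perfect_squares_alt
  obtain ⟨hr0, hlo, hhi⟩ := altFindR_spec n 0 le_rfl (by nlinarith)
  set r := altFindR n 0 with hrdef
  have hr1 : 1 ≤ r := by
    by_contra h
    have hz : r = 0 := by omega
    rw [hz] at hhi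
    omega
  have hbound : (((n.toNat + 1) * (n.toNat + 1) : Nat) : Int) = (n + 1) * (n + 1) := by
    have hn : (n.toNat : Int) = n := Int.toNat_of_nonneg (by omega)
    push_cast
    rw [hn]
  have hrn : r ≤ n - 1 := le_trans (le_mul_of_one_le_left (by omega) hr1) hlo
  have hdown : npsDown (n - 1) = r * r := npsDown_eq r (n - 1) hr1 hlo hhi
  rw [hdown, hbound]
  by_cases hsq : (r + 1) * (r + 1) = n
  · have hup : npsUp ((n + 1) * (n + 1)) (n + 1) = (r + 1 + 1) * (r + 1 + 1) :=
      npsUp_eq (r + 1) ((n + 1) * (n + 1)) (n + 1)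
        (by omega) (by omega) (by nlinarith) (by nlinarith)
    simp only [hup, hsq, if_pos]
    norm_num
    ring
  · have hne : n < (r + 1) * (r + 1) := lt_of_le_of_ne (by omega) (Ne.symm hsq)
    have hup : npsUp ((n + 1) * (n + 1)) (n + 1) = (r + 1) * (r + 1) :=
      npsUp_eq r ((n + 1) * (n + 1)) (n + 1) hr1 (by omega) (by omega) (by nlinarith)
    simp [hup, hsq]
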